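-- pv_equiv track=rewrite | github.com/root-mirror/root | bindings/experimental/distrdf/python/DistRDF/Ranges.py | get_balanced_ranges
-- ===== SOURCE A (Python) =====
-- import collections
--
-- EmptySourceRange = collections.namedtuple("EmptySourceRange", ["start", "end"])
--
-- def get_balanced_ranges(nentries, npartitions):
--     """
--     Builds range pairs from the given values of the number of entries in
--     the dataset and number of partitions required. Each range contains the
--     same amount of entries, except for those cases where the number of
--     entries is not a multiple of the partitions.
--
--     Args:
--         nentries (int): The number of entries in a dataset.
--
--         npartitions (int): The number of partititions the sequence of entries
--             should be split in.
--
--     Returns: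
--         list: List of `EmptySourceRange` namedtuples. Each tuple contains the
--             start and end entry of the corresponding range.
--     """
--     partition_size = nentries // npartitions
--
--     i = 0  # Iterator
--
--     ranges = []
--
--     remainder = nentries % npartitions
--
--     while i < nentries:
--         # Start value of current range
--         start = i
--         end = i = start + partition_size
--
--         if remainder:
--             # If the modulo value is not
--             # exhausted, add '1' to the end
--             # of the current range
--             end = i = end + 1
--             remainder -= 1
--
--         ranges.append(EmptySourceRange(start, end))
--
--     return ranges
-- ===== SOURCE B (Python) =====
-- import collections
--
-- EmptySourceRange = collections.namedtuple("EmptySourceRange", ["start", "end"])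
--
-- def get_balanced_ranges(nentries, npartitions):
--     """Closed-form boundaries: no running cursor, no mutating remainder."""
--     partition_size = nentries // npartitions
--     remainder = nentries % npartitions
--     n = min(nentries, npartitions)  # A emits only nentries ranges when nentries < npartitions
--     ranges = []
--     for i in range(n):
--         start = i * partition_size + min(i, remainder)
--         end = start + partition_size + (1 if i < remainder else 0)
--         ranges.append(EmptySourceRange(start, end))
--     return ranges
-- ===== Notes on version B (the rewrite author's own statement) =====
-- stated objective: alternative
-- what changed: Replaces A's while-loop with a running cursor and a mutating remainder by a for-loop over range(min(nentries, npartitions)) that computes each range boundary in closed form (start = i*partition_size + min(i, remainder)).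
import Mathlib
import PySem

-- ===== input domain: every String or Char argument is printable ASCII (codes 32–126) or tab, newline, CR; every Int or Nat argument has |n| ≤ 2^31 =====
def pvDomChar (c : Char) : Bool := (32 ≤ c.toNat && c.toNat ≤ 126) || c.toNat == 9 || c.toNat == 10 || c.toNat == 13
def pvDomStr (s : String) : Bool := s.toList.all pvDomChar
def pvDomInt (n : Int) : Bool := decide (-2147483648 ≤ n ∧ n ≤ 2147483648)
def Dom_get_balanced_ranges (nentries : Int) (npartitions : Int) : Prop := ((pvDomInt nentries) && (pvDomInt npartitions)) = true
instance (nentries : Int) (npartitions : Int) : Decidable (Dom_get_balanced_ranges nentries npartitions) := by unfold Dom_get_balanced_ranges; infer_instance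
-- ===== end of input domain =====

-- B replaces A's while-loop with a running cursor and mutating remainder by closed-form
-- per-index boundaries over range(min(nentries, npartitions)); objective: alternative.


-- ===== PORT A =====
-- A's while-loop: state (i, remainder, ranges); fuel bounds the iterations (under
-- Pre_ the loop runs at most nentries.toNat times, so the fuel is never exhausted).
def gbrLoop (ps : Int) (nentries : Int) : Nat → Int → Int → List (Int × Int) → List (Int × Int)
  | 0, _, _, acc => acc
  | fuel + 1, i, rem, acc =>
    if i < nentries then
      -- start = i; end = i + ps (+1 while the remainder is not exhausted)
      if rem ≠ 0 then
        gbrLoop ps nentries fuel (i + ps + 1) (rem - 1) (acc ++ [(i, i + ps + 1)])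
      else
        gbrLoop ps nentries fuel (i + ps) rem (acc ++ [(i, i + ps)])
    else acc

def get_balanced_ranges (nentries : Int) (npartitions : Int) : List (Int × Int) :=
  let ps := PySem.Int.floordiv nentries npartitions
  let rem := PySem.Int.mod nentries npartitions
  gbrLoop ps nentries nentries.toNat 0 rem []

-- ===== PORT B =====
def get_balanced_ranges_alt (nentries : Int) (npartitions : Int) : List (Int × Int) :=
  let ps := PySem.Int.floordiv nentries npartitions
  let rem := PySem.Int.mod nentries npartitions
  let n := min nentries npartitions
  (PySem.List.pyRange 0 n 1).map (fun i =>
    let start := i * ps + min i rem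
    (start, start + ps + (if i < rem then 1 else 0)))

-- ===== PRECONDITION & SPEC =====
-- Pre_ excludes exactly the inputs where A does not return: npartitions = 0
-- (ZeroDivisionError) and npartitions < 0 with 0 < nentries (the while-loop diverges).
def Pre_get_balanced_ranges (nentries : Int) (npartitions : Int) : Prop :=
  0 < npartitions ∨ (npartitions < 0 ∧ nentries ≤ 0)
instance (nentries : Int) (npartitions : Int) : Decidable (Pre_get_balanced_ranges nentries npartitions) := by unfold Pre_get_balanced_ranges; infer_instance

def pvWitness_get_balanced_ranges : Int × Int := (10, 3)

def Spec_get_balanced_ranges (nentries : Int) (npartitions : Int) (out : List (Int × Int)) : Prop := out = get_balanced_ranges_alt nentries npartitions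
instance (nentries : Int) (npartitions : Int) (out : List (Int × Int)) : Decidable (Spec_get_balanced_ranges nentries npartitions out) := by unfold Spec_get_balanced_ranges; infer_instance

-- ===== CLAIM (what is proved, stated in full; the proofs are below) =====
def Claim_equal_get_balanced_ranges : Prop := ∀ (nentries : Int) (npartitions : Int), Dom_get_balanced_ranges nentries npartitions → Pre_get_balanced_ranges nentries npartitions → Spec_get_balanced_ranges nentries npartitions (get_balanced_ranges nentries npartitions)

-- ===== LEMMAS AND PROOFS =====

-- closed-form start of range k
def gbrStart (ps rem k : Int) : Int := k * ps + min k rem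

-- the pair B emits at index k
def gbrPair (ps rem k : Int) : Int × Int :=
  (gbrStart ps rem k, gbrStart ps rem k + ps + (if k < rem then 1 else 0))

lemma gbrLoop_closed (nentries np : Int) (hnp : 0 < np) (hne : 0 ≤ nentries) :
    ∀ (m k fuel : Nat) (acc : List (Int × Int)),
      (k : Int) + m = min nentries np → m ≤ fuel →
      gbrLoop (PySem.Int.floordiv nentries np) nentries fuel
        (gbrStart (PySem.Int.floordiv nentries np) (PySem.Int.mod nentries np) k)
        (PySem.Int.mod nentries np - min (k : Int) (PySem.Int.mod nentries np)) acc
      = acc ++ (List.range m).map (fun j => gbrPair (PySem.Int.floordiv nentries np) (PySem.Int.mod nentries np) ((k + j : Nat) : Int)) := by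
  set ps := PySem.Int.floordiv nentries np with hps'
  set rem := PySem.Int.mod nentries np with hrem'
  have hid : ps * np + rem = nentries := PySem.Int.floordiv_mul_add_mod nentries np
  have hrem0 : 0 ≤ rem := PySem.Int.mod_nonneg nentries hnp
  have hremnp : rem < np := PySem.Int.mod_lt nentries hnp
  have hps0 : 0 ≤ ps := by
    rw [hps', PySem.Int.floordiv_eq_ediv_of_pos hnp]
    exact Int.ediv_nonneg hne (le_of_lt hnp)
  intro m
  induction m with
  | zero =>
    intro k fuel acc hk _
    -- at k = min nentries np the guard is false: gbrStart = nentries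
    have hstart : gbrStart ps rem k = nentries := by
      unfold gbrStart
      rcases le_total nentries np with h | h
      · have hmin : min nentries np = nentries := min_eq_left h
        rcases eq_or_lt_of_le h with heq | hlt
        · -- nentries = np : ps = 1, rem = 0
          have hps1 : ps = 1 := by
            rw [hps', (PySem.Int.floordiv_eq_iff_of_pos hnp)]
            constructor <;> omega
          rw [hps1, one_mul] at hid
          rw [hmin] at hk
          rw [hps1, mul_one]
          omega
        · -- nentries < np : ps = 0, rem = nentries
          have hps0' : ps = 0 := by
            rw [hps', (PySem.Int.floordiv_eq_iff_of_pos hnp)]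
            constructor <;> omega
          rw [hps0', zero_mul] at hid
          rw [hmin] at hk
          rw [hps0', mul_zero]
          omega
      · have hmin : min nentries np = np := min_eq_right h
        rw [hmin] at hk
        have hkc : (k : Int) = np := by omega
        rw [hkc, min_eq_right hremnp.le, mul_comm]
        omega
    cases fuel <;> simp [gbrLoop, hstart]
  | succ m ih =>
    intro k fuel acc hk hfuel
    obtain ⟨fuel', rfl⟩ : ∃ f, fuel = f + 1 := ⟨fuel - 1, by omega⟩
    have hkmin : (k : Int) < min nentries np := by omega
    have hknp : (k : Int) < np := by omega
    have hkne : (k : Int) < nentries := by omega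
    -- the loop guard holds: gbrStart k < nentries
    have hguard : gbrStart ps rem k < nentries := by
      unfold gbrStart
      rcases eq_or_lt_of_le hps0 with hps0' | hps1
      · -- ps = 0: then nentries = rem < np, so min nentries np = nentries and k < rem
        have hpse : ps = 0 := hps0'.symm
        rw [hpse, zero_mul, zero_add] at hid
        rw [hpse, mul_zero, zero_add]
        have : min nentries np = nentries := min_eq_left (by omega)
        omega
      · -- ps ≥ 1: k*ps + min k rem ≤ ps*np - ps + rem < nentries
        have h1 : ((k : Int) + 1) * ps ≤ np * ps :=
          mul_le_mul_of_nonneg_right (by omega) hps0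
        have h2 : min (k : Int) rem ≤ rem := min_le_right _ _
        nlinarith
    rcases lt_or_ge (k : Int) rem with hkr | hkr
    · -- remainder branch taken
      have hstep : gbrStart ps rem k + ps + 1 = gbrStart ps rem (k + 1) := by
        unfold gbrStart
        have h1 : min ((k : Int) + 1) rem = k + 1 := by omega
        have h2 : min (k : Int) rem = k := by omega
        rw [h1, h2]; ring
      have hrstep : rem - min (k : Int) rem - 1 = rem - min ((k : Int) + 1) rem := by omega
      simp only [gbrLoop, if_pos hguard]
      rw [if_pos (by omega : rem - min (k : Int) rem ≠ 0)]
      rw [hstep, hrstep]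
      have hih := ih (k + 1) fuel' (acc ++ [(gbrStart ps rem k, gbrStart ps rem (k + 1))])
        (by push_cast; omega) (by omega)
      push_cast at hih
      rw [hih, List.range_succ_eq_map]
      simp only [List.map_cons, List.map_map, Nat.add_zero,
        List.append_assoc, List.cons_append, List.nil_append]
      congr 1
      congr 1
      · simp [gbrPair, if_pos hkr, ← hstep]
      · apply List.map_congr_left
        intro j _
        simp only [Function.comp]
        congr 1
        omega
    · -- remainder exhausted for this index
      have hmk : min (k : Int) rem = rem := by omega
      have hmk1 : min ((k : Int) + 1) rem = rem := by omega
      have hstep : gbrStart ps rem k + ps = gbrStart ps rem (k + 1) := by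
        unfold gbrStart; rw [hmk, hmk1]; ring
      simp only [gbrLoop, if_pos hguard]
      rw [if_neg (by omega : ¬ (rem - min (k : Int) rem ≠ 0))]
      rw [hstep]
      have hrw : rem - min (k : Int) rem = rem - min ((k : Int) + 1) rem := by omega
      rw [hrw]
      have hih := ih (k + 1) fuel' (acc ++ [(gbrStart ps rem k, gbrStart ps rem (k + 1))])
        (by push_cast; omega) (by omega)
      push_cast at hih
      rw [hih, List.range_succ_eq_map]
      simp only [List.map_cons, List.map_map, Nat.add_zero,
        List.append_assoc, List.cons_append, List.nil_append]
      congr 1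
      congr 1
      · simp [gbrPair, if_neg (by omega : ¬ (k : Int) < rem), ← hstep]
      · apply List.map_congr_left
        intro j _
        simp only [Function.comp]
        congr 1
        omega

-- ===== VERDICT (by name: the statement is the Claim_ definition above) =====
theorem get_balanced_ranges_spec : Claim_equal_get_balanced_ranges := by
  intro nentries np _ hpre
  unfold Spec_get_balanced_ranges get_balanced_ranges get_balanced_ranges_alt
  set ps := PySem.Int.floordiv nentries np with hps'
  set rem := PySem.Int.mod nentries np with hrem'
  rcases hpre with hnp | ⟨hnp, hne⟩
  · rcases le_or_gt 0 nentries with hne | hne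
    · -- main case: apply the closed-form loop lemma with k = 0
      have hrem0 : 0 ≤ rem := PySem.Int.mod_nonneg nentries hnp
      have h0 : gbrStart ps rem 0 = 0 := by unfold gbrStart; omega
      have hm0 : min (0 : Int) rem = 0 := by omega
      set n := (min nentries np).toNat with hn'
      have hcast : ((0 : Nat) : Int) + (n : Int) = min nentries np := by
        simp [hn']; omega
      have hfuel : n ≤ nentries.toNat := by
        have : min nentries np ≤ nentries := min_le_left _ _
        omega
      have := gbrLoop_closed nentries np hnp hne n 0 nentries.toNat [] hcast hfuel
      rw [Nat.cast_zero, h0, hm0, sub_zero] at this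
      rw [this]
      simp only [PySem.List.pyRange_one, List.nil_append, List.map_map, sub_zero, ← hn']
      apply List.map_congr_left
      intro j _
      simp only [gbrPair, gbrStart, Function.comp, ← hps', ← hrem']
      rfl
    · -- nentries < 0 : A's fuel is 0 (empty loop); B's range is empty
      have ht : nentries.toNat = 0 := by omega
      have hmle : min nentries np ≤ nentries := min_le_left _ _
      have h0 : (min nentries np - 0).toNat = 0 := by omega
      rw [ht]
      simp only [PySem.List.pyRange_one, h0]
      simp [gbrLoop]
  · -- npartitions < 0, nentries ≤ 0 : both sides empty
    have ht : nentries.toNat = 0 := by omega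
    have hmle : min nentries np ≤ np := min_le_right _ _
    have h0 : (min nentries np - 0).toNat = 0 := by omega
    rw [ht]
    simp only [PySem.List.pyRange_one, h0]
    simp [gbrLoop]
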